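-- pv_equiv track=rewrite | github.com/matthew-li/lbnl_scripts | slurm_digest/slurm_digest.py | get_rows_by_notification_type
-- ===== SOURCE A (Python) =====
-- FIELDS = {
--     "NOTIFICATION TYPE": 0,
--     "SERVICE": 1,
--     "HOST": 2,
--     "ADDRESS": 3,
--     "STATE": 4,
--     "DATE/TIME": 5,
--     "ADDITIONAL INFO": 6
-- }
--
-- def get_rows_by_notification_type(rows):
--     """Return a dictionary containing three subsets of the given rows, where each contains rows
--     with notification type "PROBLEM", "RECOVERY", or something else.
--
--     Keyword Arguments:
--     rows -- input data, where one of the columns pertains to the notification type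
--     """
--     problem, recovery, other = ([] for i in range(3))
--     for row in rows:
--         notification_type = row[FIELDS["NOTIFICATION TYPE"]]
--         if notification_type == "PROBLEM":
--             problem.append(row)
--         elif notification_type == "RECOVERY":
--             recovery.append(row)
--         else:
--             other.append(row)
--     return {"PROBLEM": problem, "RECOVERY": recovery, "OTHER": other}
-- ===== SOURCE B (Python) =====
-- def get_rows_by_notification_type(rows):
--     """Three independent selection passes over rows instead of one accumulating loop."""
--     problem = [row for row in rows if row[0] == "PROBLEM"]
--     recovery = [row for row in rows if row[0] == "RECOVERY"]
--     other = [row for row in rows if row[0] not in ("PROBLEM", "RECOVERY")]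
--     return {"PROBLEM": problem, "RECOVERY": recovery, "OTHER": other}
-- ===== Notes on version B (the rewrite author's own statement) =====
-- stated objective: alternative
-- what changed: A builds the three buckets in one accumulating loop with appends; B makes three independent filtering passes over rows, one per bucket, and assembles the dict from the three filtered lists.
import Mathlib
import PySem

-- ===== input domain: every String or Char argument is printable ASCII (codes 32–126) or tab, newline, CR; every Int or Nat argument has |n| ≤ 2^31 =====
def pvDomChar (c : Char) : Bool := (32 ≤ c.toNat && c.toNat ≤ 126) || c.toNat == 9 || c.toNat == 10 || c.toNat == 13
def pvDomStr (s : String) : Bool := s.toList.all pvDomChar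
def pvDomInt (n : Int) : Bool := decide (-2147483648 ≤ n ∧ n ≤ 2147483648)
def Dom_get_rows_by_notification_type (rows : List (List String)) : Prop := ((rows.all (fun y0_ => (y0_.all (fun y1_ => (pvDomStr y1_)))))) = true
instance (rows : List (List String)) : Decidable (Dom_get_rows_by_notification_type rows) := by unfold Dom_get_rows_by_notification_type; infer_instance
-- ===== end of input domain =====

-- B replaces A's single accumulating loop over three buckets with three independent
-- filtering passes over rows, one per notification type (alternative decomposition).


-- ===== PORT A =====
-- One fold carrying the (problem, recovery, other) accumulator, appending each row
-- to its bucket.  row[0] is PySem.List.pyGet? row 0; Pre_ guarantees it is some _,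
-- so the .getD "" default is never reached on admitted inputs (Python raises there).
def get_rows_by_notification_type (rows : List (List String)) : List (String × List (List String)) :=
  let acc := rows.foldl
    (fun (s : List (List String) × List (List String) × List (List String)) row =>
      let nt := (PySem.List.pyGet? row (0 : Int)).getD ""
      if nt = "PROBLEM" then (s.1 ++ [row], s.2.1, s.2.2)
      else if nt = "RECOVERY" then (s.1, s.2.1 ++ [row], s.2.2)
      else (s.1, s.2.1, s.2.2 ++ [row]))
    ([], [], [])
  [("PROBLEM", acc.1), ("RECOVERY", acc.2.1), ("OTHER", acc.2.2)]

-- ===== PORT B =====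
-- Three independent filtering passes, one per bucket.
def get_rows_by_notification_type_alt (rows : List (List String)) : List (String × List (List String)) :=
  [("PROBLEM",  rows.filter (fun row => ((PySem.List.pyGet? row (0 : Int)).getD "") = "PROBLEM")),
   ("RECOVERY", rows.filter (fun row => ((PySem.List.pyGet? row (0 : Int)).getD "") = "RECOVERY")),
   ("OTHER",    rows.filter (fun row =>
      let nt := (PySem.List.pyGet? row (0 : Int)).getD ""
      ¬ (nt = "PROBLEM" ∨ nt = "RECOVERY")))]

-- ===== PRECONDITION & SPEC =====
-- Pre_ excludes inputs containing an empty row: there Python's row[0] raises IndexError (in A and in B alike).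
def Pre_get_rows_by_notification_type (rows : List (List String)) : Prop :=
  ∀ row ∈ rows, row ≠ []
instance (rows : List (List String)) : Decidable (Pre_get_rows_by_notification_type rows) := by unfold Pre_get_rows_by_notification_type; infer_instance
def pvWitness_get_rows_by_notification_type : List (List String) :=
  [["PROBLEM", "svc"], ["RECOVERY", "svc"], ["HOST DOWN", "h"]]
def Spec_get_rows_by_notification_type (rows : List (List String)) (out : List (String × List (List String))) : Prop := out = get_rows_by_notification_type_alt rows
instance (rows : List (List String)) (out : List (String × List (List String))) : Decidable (Spec_get_rows_by_notification_type rows out) := by unfold Spec_get_rows_by_notification_type; infer_instance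

-- ===== CLAIM (what is proved, stated in full; the proofs are below) =====
def Claim_equal_get_rows_by_notification_type : Prop := ∀ (rows : List (List String)), Dom_get_rows_by_notification_type rows → Pre_get_rows_by_notification_type rows → Spec_get_rows_by_notification_type rows (get_rows_by_notification_type rows)

-- ===== LEMMAS AND PROOFS =====

lemma pv_acc_eq (rows : List (List String))
    (p r o : List (List String)) :
    rows.foldl
      (fun (s : List (List String) × List (List String) × List (List String)) row =>
        let nt := (PySem.List.pyGet? row (0 : Int)).getD ""
        if nt = "PROBLEM" then (s.1 ++ [row], s.2.1, s.2.2)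
        else if nt = "RECOVERY" then (s.1, s.2.1 ++ [row], s.2.2)
        else (s.1, s.2.1, s.2.2 ++ [row]))
      (p, r, o)
    = (p ++ rows.filter (fun row => ((PySem.List.pyGet? row (0 : Int)).getD "") = "PROBLEM"),
       r ++ rows.filter (fun row => ((PySem.List.pyGet? row (0 : Int)).getD "") = "RECOVERY"),
       o ++ rows.filter (fun row =>
         let nt := (PySem.List.pyGet? row (0 : Int)).getD ""
         ¬ (nt = "PROBLEM" ∨ nt = "RECOVERY"))) := by
  induction rows generalizing p r o with
  | nil => simp
  | cons h t ih =>
    by_cases hp : ((PySem.List.pyGet? h (0 : Int)).getD "") = "PROBLEM"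
    · simp [List.foldl_cons, hp, ih, List.filter_cons]
    · by_cases hr : ((PySem.List.pyGet? h (0 : Int)).getD "") = "RECOVERY"
      · simp [List.foldl_cons, hp, hr, ih]
      · simp [List.foldl_cons, hp, hr, ih]

-- ===== VERDICT (by name: the statement is the Claim_ definition above) =====
theorem get_rows_by_notification_type_spec : Claim_equal_get_rows_by_notification_type := by
  intro rows _ _
  unfold Spec_get_rows_by_notification_type get_rows_by_notification_type get_rows_by_notification_type_alt
  simp [pv_acc_eq rows [] [] []]
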